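-- pv_equiv track=rewrite | github.com/ercan-akar/Yannik-Script | PPA/src/analysis.py | check_cases
-- ===== SOURCE A (Python) =====
-- def check_cases(cases, time_or_batch, classification_or_regression):
--     # cases, where both are given
--     if any([case['data'] == time_or_batch and case['analysis'] == classification_or_regression for case in cases if 'data' in case.keys() and 'analysis' in case.keys()]):
--         return True
--     # cases, where only data is given
--     if any([case['data'] == time_or_batch for case in cases if 'data' in case.keys() and 'analysis' not in case.keys()]):
--         return True
--     # cases, where only analysis is given
--     if any([case['analysis'] == classification_or_regression for case in cases if 'data' not in case.keys() and 'analysis' in case.keys()]):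
--         return True
--     return False
-- ===== SOURCE B (Python) =====
-- def check_cases(cases, time_or_batch, classification_or_regression):
--     for case in cases:
--         has_data = 'data' in case
--         has_analysis = 'analysis' in case
--         if has_data and has_analysis:
--             if case['data'] == time_or_batch and case['analysis'] == classification_or_regression:
--                 return True
--         elif has_data:
--             if case['data'] == time_or_batch:
--                 return True
--         elif has_analysis:
--             if case['analysis'] == classification_or_regression:
--                 return True
--     return False
-- ===== Notes on version B (the rewrite author's own statement) =====
-- stated objective: simpler
-- what changed: Replaces A's three full list comprehensions + any() scans by a single one-pass loop that dispatches on key presence per case and returns on the first match.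
import Mathlib
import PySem

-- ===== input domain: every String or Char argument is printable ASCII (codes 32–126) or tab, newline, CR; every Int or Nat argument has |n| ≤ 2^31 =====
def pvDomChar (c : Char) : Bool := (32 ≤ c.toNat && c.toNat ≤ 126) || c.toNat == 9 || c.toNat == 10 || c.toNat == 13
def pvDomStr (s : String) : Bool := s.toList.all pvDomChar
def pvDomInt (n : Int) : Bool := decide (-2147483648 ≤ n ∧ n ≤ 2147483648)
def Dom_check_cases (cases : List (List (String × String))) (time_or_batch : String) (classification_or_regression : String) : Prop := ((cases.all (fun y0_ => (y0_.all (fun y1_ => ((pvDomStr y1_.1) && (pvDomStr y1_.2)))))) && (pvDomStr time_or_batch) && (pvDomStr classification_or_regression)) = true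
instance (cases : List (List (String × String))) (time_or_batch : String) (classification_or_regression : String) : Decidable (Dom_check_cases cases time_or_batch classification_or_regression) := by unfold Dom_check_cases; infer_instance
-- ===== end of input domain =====

-- B replaces A's three separate any()-scans by one single-pass dispatch loop over cases (simpler, one traversal).


-- ===== PORT A =====
def getKey (case : List (String × String)) (k : String) : Option String :=
  (PySem.Dict.mk case).get? k

def check_cases (cases : List (List (String × String))) (time_or_batch : String) (classification_or_regression : String) : Bool :=
  -- cases, where both are given
  if ((cases.filter (fun case => (getKey case "data").isSome && (getKey case "analysis").isSome)).map
        (fun case => decide (getKey case "data" = some time_or_batch) &&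
                     decide (getKey case "analysis" = some classification_or_regression))).any id then
    true
  -- cases, where only data is given
  else if ((cases.filter (fun case => (getKey case "data").isSome && !(getKey case "analysis").isSome)).map
        (fun case => decide (getKey case "data" = some time_or_batch))).any id then
    true
  -- cases, where only analysis is given
  else if ((cases.filter (fun case => !(getKey case "data").isSome && (getKey case "analysis").isSome)).map
        (fun case => decide (getKey case "analysis" = some classification_or_regression))).any id then
    true
  else
    false

-- ===== PORT B =====
def altLoop (time_or_batch classification_or_regression : String) :
    List (List (String × String)) → Bool
  | [] => false
  | case :: rest =>
    let hasData := (getKey case "data").isSome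
    let hasAnalysis := (getKey case "analysis").isSome
    let hit :=
      if hasData && hasAnalysis then
        decide (getKey case "data" = some time_or_batch) &&
        decide (getKey case "analysis" = some classification_or_regression)
      else if hasData then
        decide (getKey case "data" = some time_or_batch)
      else if hasAnalysis then
        decide (getKey case "analysis" = some classification_or_regression)
      else
        false
    hit || altLoop time_or_batch classification_or_regression rest

def check_cases_alt (cases : List (List (String × String))) (time_or_batch : String) (classification_or_regression : String) : Bool :=
  altLoop time_or_batch classification_or_regression cases

-- ===== PRECONDITION & SPEC =====
def Spec_check_cases (cases : List (List (String × String))) (time_or_batch : String) (classification_or_regression : String) (out : Bool) : Prop := out = check_cases_alt cases time_or_batch classification_or_regression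
instance (cases : List (List (String × String))) (time_or_batch : String) (classification_or_regression : String) (out : Bool) : Decidable (Spec_check_cases cases time_or_batch classification_or_regression out) := by unfold Spec_check_cases; infer_instance

-- ===== CLAIM (what is proved, stated in full; the proofs are below) =====
def Claim_equal_check_cases : Prop := ∀ (cases : List (List (String × String))) (time_or_batch : String) (classification_or_regression : String), Dom_check_cases cases time_or_batch classification_or_regression → Spec_check_cases cases time_or_batch classification_or_regression (check_cases cases time_or_batch classification_or_regression)

-- ===== LEMMAS AND PROOFS =====

-- ===== VERDICT (by name: the statement is the Claim_ definition above) =====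
theorem check_cases_eq_alt (cases : List (List (String × String))) (t c : String) :
    check_cases cases t c = check_cases_alt cases t c := by
  unfold check_cases check_cases_alt
  induction cases with
  | nil => simp [altLoop]
  | cons case rest ih =>
    simp only [altLoop, List.filter_cons]
    by_cases hd : (getKey case "data").isSome <;>
      by_cases ha : (getKey case "analysis").isSome <;>
        simp only [hd, ha, Bool.and_true, Bool.and_false, Bool.and_self, Bool.not_true,
          Bool.not_false, if_true, List.map_cons, List.any_cons, id, ← ih] <;>
      · by_cases h1 : (getKey case "data" = some t) <;>
          by_cases h2 : (getKey case "analysis" = some c) <;>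
            simp [h1, h2]

theorem check_cases_spec : Claim_equal_check_cases := by
  intro cases t c _
  exact check_cases_eq_alt cases t c
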